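-- pv_equiv track=rewrite | github.com/jednipit-golf/Comprog | ทด/old final exam last part.py | reverse_digits
-- ===== SOURCE A (Python) =====
-- def reverse_digits(t):
--     numbers = ''
--     for e in t:
--         if '0' <= e <= '9':
--             numbers += e
--     ans = ''
--     for e in t:
--         if '0' <= e <= '9':
--             ans += numbers[-1]
--             n = len(numbers)
--             numbers = numbers[:n-1:]
--         else:
--             ans += e
--     return ans
-- ===== SOURCE B (Python) =====
-- def reverse_digits(t):
--     a = list(t)
--     i, j = 0, len(a) - 1
--     while i < j:
--         if not ('0' <= a[i] <= '9'):
--             i += 1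
--         elif not ('0' <= a[j] <= '9'):
--             j -= 1
--         else:
--             a[i], a[j] = a[j], a[i]
--             i += 1
--             j -= 1
--     return ''.join(a)
-- ===== Notes on version B (the rewrite author's own statement) =====
-- stated objective: alternative
-- what changed: B never extracts the digits: it turns the string into a char array and reverses the digits in place with the classic two-pointer swap (advance the left/right pointers past non-digits, swap each digit pair), instead of A's collect-digits-then-re-emit with per-step string slicing; it trades A's two staged passes for one index-driven loop.
import Mathlib
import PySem

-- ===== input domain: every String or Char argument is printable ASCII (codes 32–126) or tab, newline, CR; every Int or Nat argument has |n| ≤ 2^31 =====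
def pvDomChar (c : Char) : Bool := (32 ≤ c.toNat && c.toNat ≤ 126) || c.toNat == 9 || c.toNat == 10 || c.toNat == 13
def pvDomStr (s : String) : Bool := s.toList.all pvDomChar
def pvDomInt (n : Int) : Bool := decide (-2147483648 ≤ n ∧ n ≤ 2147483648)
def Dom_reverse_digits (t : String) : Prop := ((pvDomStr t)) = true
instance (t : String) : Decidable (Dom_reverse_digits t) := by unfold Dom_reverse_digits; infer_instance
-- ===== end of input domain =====

-- B reverses the digits in place with a two-pointer swap (no digit extraction, no slicing) instead of A's collect-then-re-emit; objective: alternative algorithm.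


-- ===== PORT A =====
-- first loop of A: numbers += e for each digit e
def pvCollectA : List Char → List Char → List Char
  | [], acc => acc
  | e :: rest, acc =>
    if '0' ≤ e ∧ e ≤ '9' then pvCollectA rest (acc ++ [e]) else pvCollectA rest acc

-- second loop of A: ans += numbers[-1]; numbers = numbers[:n-1:].
-- numbers[-1] is ported as getLast?.getD ' '; the default is never used because the
-- second loop takes the digit branch exactly as many times as numbers has characters.
def pvGoA : List Char → List Char → List Char → List Char
  | [], _, ans => ans
  | e :: rest, nums, ans =>
    if '0' ≤ e ∧ e ≤ '9' then
      pvGoA rest nums.dropLast (ans ++ [nums.getLast?.getD ' '])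
    else
      pvGoA rest nums (ans ++ [e])

def reverse_digits (t : String) : String :=
  String.ofList (pvGoA t.toList (pvCollectA t.toList []) [])

-- ===== PORT B =====
-- B's while loop: two pointers i from the left, j from the right; skip non-digits,
-- swap digit pairs in place.  Indices stay in range whenever the loop body runs
-- (i < j ≤ initial j = len-1), so List.getD mirrors Python's a[i]/a[j] exactly.
def pvLoopB (a : List Char) (i j : Nat) : List Char :=
  if _h : i < j then
    if ¬ ('0' ≤ a.getD i ' ' ∧ a.getD i ' ' ≤ '9') then
      pvLoopB a (i + 1) j
    else if ¬ ('0' ≤ a.getD j ' ' ∧ a.getD j ' ' ≤ '9') then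
      pvLoopB a i (j - 1)
    else
      pvLoopB ((a.set i (a.getD j ' ')).set j (a.getD i ' ')) (i + 1) (j - 1)
  else a
termination_by j - i
decreasing_by all_goals omega

def reverse_digits_alt (t : String) : String :=
  String.ofList (pvLoopB t.toList 0 (t.toList.length - 1))

-- ===== PRECONDITION & SPEC =====
def Spec_reverse_digits (t : String) (out : String) : Prop := out = reverse_digits_alt t
instance (t : String) (out : String) : Decidable (Spec_reverse_digits t out) := by unfold Spec_reverse_digits; infer_instance

-- ===== CLAIM (what is proved, stated in full; the proofs are below) =====
def Claim_equal_reverse_digits : Prop := ∀ (t : String), Dom_reverse_digits t → Spec_reverse_digits t (reverse_digits t)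

-- ===== LEMMAS AND PROOFS =====

-- intermediate description used only by the proofs: replace each digit of cs by the
-- next element of ds (a stream of digits)
def pvWalk : List Char → List Char → List Char
  | [], _ => []
  | e :: rest, ds =>
    if '0' ≤ e ∧ e ≤ '9' then
      match ds with
      | d :: ds' => d :: pvWalk rest ds'
      | [] => pvWalk rest []
    else
      e :: pvWalk rest ds

-- split off the LAST digit: some (M, e, B) with L = M ++ e :: B, e a digit, B digit-free
def pvSplitLast : List Char → Option (List Char × Char × List Char)
  | [] => none
  | c :: rest =>
    match pvSplitLast rest with
    | some (M, e, B) => some (c :: M, e, B)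
    | none => if '0' ≤ c ∧ c ≤ '9' then some ([], c, rest) else none

theorem pvSplitLast_none : ∀ (L : List Char),
    pvSplitLast L = none → ∀ c ∈ L, ¬ ('0' ≤ c ∧ c ≤ '9') := by
  intro L
  induction L with
  | nil => intro _; simp
  | cons c rest ih =>
    intro h
    simp only [pvSplitLast] at h
    cases hr : pvSplitLast rest with
    | some p => rw [hr] at h; obtain ⟨M, e, B⟩ := p; simp at h
    | none =>
      rw [hr] at h
      by_cases hc : '0' ≤ c ∧ c ≤ '9'
      · simp [hc] at h
      · intro d hd
        rcases List.mem_cons.mp hd with h1 | h1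
        · subst h1; exact hc
        · exact ih hr d h1

theorem pvSplitLast_shape : ∀ (L M B : List Char) (e : Char),
    pvSplitLast L = some (M, e, B) →
    L = M ++ e :: B ∧ ('0' ≤ e ∧ e ≤ '9') ∧ ∀ c ∈ B, ¬ ('0' ≤ c ∧ c ≤ '9') := by
  intro L
  induction L with
  | nil => intro M B e h; simp [pvSplitLast] at h
  | cons c rest ih =>
    intro M B e h
    simp only [pvSplitLast] at h
    cases hr : pvSplitLast rest with
    | some p =>
      obtain ⟨M', e', B'⟩ := p
      rw [hr] at h
      obtain ⟨hs, hd, hf⟩ := ih M' B' e' hr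
      injection h with h'
      cases h'
      exact ⟨by simp [hs], hd, hf⟩
    | none =>
      rw [hr] at h
      by_cases hc : '0' ≤ c ∧ c ≤ '9'
      · rw [if_pos hc] at h
        injection h with h'
        cases h'
        exact ⟨rfl, hc, pvSplitLast_none rest hr⟩
      · rw [if_neg hc] at h
        exact absurd h (by simp)

theorem filter_nil_of_nodig (B : List Char) (h : ∀ c ∈ B, ¬ ('0' ≤ c ∧ c ≤ '9')) :
    B.filter (fun c => decide ('0' ≤ c ∧ c ≤ '9')) = [] := by
  rw [List.filter_eq_nil_iff]
  intro a ha
  simpa using h a ha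

theorem pvSplitLast_len {L M B : List Char} {e : Char}
    (h : pvSplitLast L = some (M, e, B)) : M.length < L.length := by
  have := (pvSplitLast_shape L M B e h).1
  subst this; simp

-- "swap outermost digits" recursive description of the result
def revd : List Char → List Char
  | [] => []
  | c :: rest =>
    if '0' ≤ c ∧ c ≤ '9' then
      match h : pvSplitLast rest with
      | none => c :: rest
      | some (M, e, B) => e :: (revd M ++ c :: B)
    else c :: revd rest
termination_by L => L.length
decreasing_by
  · have := pvSplitLast_len h; simp; omega
  · simp

theorem revd_cons_dig_none (c : Char) (rest : List Char)
    (hc : '0' ≤ c ∧ c ≤ '9') (hr : pvSplitLast rest = none) :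
    revd (c :: rest) = c :: rest := by
  rw [revd]
  simp only [if_pos hc]
  split
  · rfl
  · next M e B heq => rw [hr] at heq; exact absurd heq (by simp)

theorem revd_cons_dig_some (c : Char) (rest M B : List Char) (e : Char)
    (hc : '0' ≤ c ∧ c ≤ '9') (hr : pvSplitLast rest = some (M, e, B)) :
    revd (c :: rest) = e :: (revd M ++ c :: B) := by
  rw [revd]
  simp only [if_pos hc]
  split
  · next heq => rw [hr] at heq; exact absurd heq (by simp)
  · next M' e' B' heq =>
    rw [hr] at heq
    injection heq with h'
    cases h'
    rfl

theorem revd_cons_nondig (c : Char) (rest : List Char) (hc : ¬ ('0' ≤ c ∧ c ≤ '9')) :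
    revd (c :: rest) = c :: revd rest := by
  rw [revd]; simp [hc]

theorem revd_nil : revd [] = [] := by simp [revd]

theorem revd_single (c : Char) : revd [c] = [c] := by
  by_cases hc : '0' ≤ c ∧ c ≤ '9'
  · exact revd_cons_dig_none c [] hc rfl
  · rw [revd_cons_nondig c [] hc, revd_nil]

-- ----- A-side: A's result is pvWalk cs (digits cs).reverse -----

theorem pvCollectA_eq_filter (cs acc : List Char) :
    pvCollectA cs acc = acc ++ cs.filter (fun c => decide ('0' ≤ c ∧ c ≤ '9')) := by
  induction cs generalizing acc with
  | nil => simp [pvCollectA]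
  | cons e rest ih =>
    by_cases h : '0' ≤ e ∧ e ≤ '9' <;> simp [pvCollectA, h, ih]

theorem pvGoA_eq_walk (rest nums ans : List Char)
    (h : (rest.filter (fun c => decide ('0' ≤ c ∧ c ≤ '9'))).length = nums.length) :
    pvGoA rest nums ans = ans ++ pvWalk rest nums.reverse := by
  induction rest generalizing nums ans with
  | nil =>
    have : nums = [] := by
      cases nums with
      | nil => rfl
      | cons a l => simp at h
    subst this; simp [pvGoA, pvWalk]
  | cons e rest ih =>
    by_cases hd : '0' ≤ e ∧ e ≤ '9'
    · cases hr : nums.reverse with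
      | nil =>
        have : nums = [] := by
          have := congrArg List.reverse hr; simpa using this
        subst this
        simp [hd] at h
      | cons d ds' =>
        have hnums : nums = ds'.reverse ++ [d] := by
          have := congrArg List.reverse hr; simpa using this
        subst hnums
        have hlen : (rest.filter (fun c => decide ('0' ≤ c ∧ c ≤ '9'))).length = ds'.reverse.length := by
          simp [hd] at h; simp; omega
        simp only [pvGoA, if_pos hd]
        rw [show (ds'.reverse ++ [d]).dropLast = ds'.reverse by simp,
            show (ds'.reverse ++ [d]).getLast?.getD ' ' = d by simp]
        rw [ih ds'.reverse (ans ++ [d]) hlen]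
        simp [pvWalk, hd]
    · simp only [pvGoA, if_neg hd]
      rw [ih nums (ans ++ [e]) (by simpa [hd] using h)]
      simp [pvWalk, hd]

-- ----- pvWalk cs (digits cs).reverse = revd cs -----

theorem pvWalk_nodig (B ds : List Char)
    (h : ∀ c ∈ B, ¬ ('0' ≤ c ∧ c ≤ '9')) : pvWalk B ds = B := by
  induction B generalizing ds with
  | nil => simp [pvWalk]
  | cons c rest ih =>
    have hc : ¬ ('0' ≤ c ∧ c ≤ '9') := h c (by simp)
    simp [pvWalk, hc, ih _ (fun d hd => h d (by simp [hd]))]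

theorem pvWalk_append (M rest ds ds' : List Char)
    (h : ds.length = (M.filter (fun c => decide ('0' ≤ c ∧ c ≤ '9'))).length) :
    pvWalk (M ++ rest) (ds ++ ds') = pvWalk M ds ++ pvWalk rest ds' := by
  induction M generalizing ds with
  | nil =>
    have : ds = [] := by cases ds <;> simp_all
    subst this; simp [pvWalk]
  | cons c M ih =>
    by_cases hc : '0' ≤ c ∧ c ≤ '9'
    · rw [List.filter_cons_of_pos (by simpa using hc), List.length_cons] at h
      cases ds with
      | nil => simp at h
      | cons d ds =>
        have h' : ds.length = (M.filter (fun c => decide ('0' ≤ c ∧ c ≤ '9'))).length := by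
          simp only [List.length_cons] at h; omega
        simp [pvWalk, hc, ih ds h']
    · rw [List.filter_cons_of_neg (by simpa using hc)] at h
      simp [pvWalk, hc, ih ds h]

theorem pvWalk_eq_revd_aux : ∀ (n : Nat) (cs : List Char), cs.length ≤ n →
    pvWalk cs ((cs.filter (fun c => decide ('0' ≤ c ∧ c ≤ '9'))).reverse) = revd cs := by
  intro n
  induction n with
  | zero =>
    intro cs h
    have : cs = [] := by cases cs <;> simp_all
    subst this; simp [pvWalk, revd]
  | succ n ih =>
    intro cs hlen
    cases cs with
    | nil => simp [pvWalk, revd]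
    | cons c rest =>
      by_cases hc : '0' ≤ c ∧ c ≤ '9'
      · cases hr : pvSplitLast rest with
        | none =>
          have hrf := pvSplitLast_none rest hr
          have hfe := filter_nil_of_nodig rest hrf
          rw [revd_cons_dig_none c rest hc hr]
          rw [List.filter_cons_of_pos (by simpa using hc), hfe]
          simp [pvWalk, hc, pvWalk_nodig rest [] hrf]
        | some p =>
          obtain ⟨M, e, B⟩ := p
          obtain ⟨hs, he, hBf⟩ := pvSplitLast_shape rest M B e hr
          subst hs
          have hBnil := filter_nil_of_nodig B hBf
          have hfil : (c :: (M ++ e :: B)).filter (fun c => decide ('0' ≤ c ∧ c ≤ '9'))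
              = c :: (M.filter (fun c => decide ('0' ≤ c ∧ c ≤ '9')) ++ [e]) := by
            rw [List.filter_cons_of_pos (by simpa using hc), List.filter_append,
                List.filter_cons_of_pos (by simpa using he), hBnil]
          rw [hfil, revd_cons_dig_some c _ M B e hc hr]
          have hstep : pvWalk (c :: (M ++ e :: B))
              ((c :: (M.filter (fun c => decide ('0' ≤ c ∧ c ≤ '9')) ++ [e])).reverse)
              = e :: pvWalk (M ++ e :: B)
                  ((M.filter (fun c => decide ('0' ≤ c ∧ c ≤ '9'))).reverse ++ [c]) := by
            simp [pvWalk, hc]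
          rw [hstep]
          rw [show (M ++ e :: B) = M ++ ([e] ++ B) by simp,
              pvWalk_append M ([e] ++ B) _ [c] (by simp)]
          rw [ih M (by simp at hlen; omega)]
          have hw : pvWalk ([e] ++ B) [c] = c :: B := by
            simp [pvWalk, he, pvWalk_nodig B [] hBf]
          rw [hw]
      · rw [revd_cons_nondig c rest hc,
            List.filter_cons_of_neg (by simpa using hc)]
        have := ih rest (by simp at hlen; omega)
        conv_lhs => rw [pvWalk.eq_def]
        simp only [if_neg hc]
        rw [this]

-- ----- revd structural lemmas used by the loop proof -----

theorem pvSplitLast_append_nondig (L : List Char) (x : Char) (hx : ¬ ('0' ≤ x ∧ x ≤ '9')) :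
    pvSplitLast (L ++ [x]) =
      (pvSplitLast L).map (fun p => (p.1, p.2.1, p.2.2 ++ [x])) := by
  induction L with
  | nil => simp [pvSplitLast, hx]
  | cons c rest ih =>
    simp only [List.cons_append, pvSplitLast, ih]
    cases hr : pvSplitLast rest with
    | some p => obtain ⟨M, e, B⟩ := p; simp
    | none => by_cases hc : '0' ≤ c ∧ c ≤ '9' <;> simp [hc]

theorem revd_append_nondig : ∀ (n : Nat) (L : List Char) (x : Char), L.length ≤ n →
    ¬ ('0' ≤ x ∧ x ≤ '9') → revd (L ++ [x]) = revd L ++ [x] := by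
  intro n
  induction n with
  | zero =>
    intro L x h hx
    have : L = [] := by cases L <;> simp_all
    subst this; simp [revd_nil, revd_single]
  | succ n ih =>
    intro L x hlen hx
    cases L with
    | nil => simp [revd_nil, revd_single]
    | cons c rest =>
      by_cases hc : '0' ≤ c ∧ c ≤ '9'
      · cases hr : pvSplitLast rest with
        | none =>
          have hr' : pvSplitLast (rest ++ [x]) = none := by
            rw [pvSplitLast_append_nondig rest x hx, hr]; rfl
          rw [List.cons_append, revd_cons_dig_none c _ hc hr',
              revd_cons_dig_none c rest hc hr]
          simp
        | some p =>
          obtain ⟨M, e, B⟩ := p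
          have hr' : pvSplitLast (rest ++ [x]) = some (M, e, B ++ [x]) := by
            rw [pvSplitLast_append_nondig rest x hx, hr]; rfl
          rw [List.cons_append, revd_cons_dig_some c _ M (B ++ [x]) e hc hr',
              revd_cons_dig_some c rest M B e hc hr]
          simp
      · rw [List.cons_append, revd_cons_nondig c _ hc, revd_cons_nondig c _ hc,
            ih rest x (by simp at hlen; omega) hx]
        simp

theorem pvSplitLast_concat_dig (M : List Char) (e : Char) (he : '0' ≤ e ∧ e ≤ '9') :
    pvSplitLast (M ++ [e]) = some (M, e, []) := by
  induction M with
  | nil => simp [pvSplitLast, he]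
  | cons c rest ih => simp [pvSplitLast, ih]

theorem revd_dig_ends (d e : Char) (M : List Char)
    (hd : '0' ≤ d ∧ d ≤ '9') (he : '0' ≤ e ∧ e ≤ '9') :
    revd (d :: (M ++ [e])) = e :: (revd M ++ [d]) := by
  rw [revd_cons_dig_some d _ M [] e hd (pvSplitLast_concat_dig M e he)]

-- ----- list index helpers for the two-pointer loop -----

theorem take_set_of_le {α : Type} (l : List α) (k m : Nat) (x : α) (h : m ≤ k) :
    (l.set k x).take m = l.take m := by
  apply List.ext_getElem
  · simp
  · intro i h1 h2
    simp only [List.getElem_take, List.getElem_set]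
    rw [if_neg]
    simp at h1; omega

theorem drop_set_of_lt {α : Type} (l : List α) (k m : Nat) (x : α) (h : k < m) :
    (l.set k x).drop m = l.drop m := by
  apply List.ext_getElem
  · simp
  · intro i h1 h2
    simp only [List.getElem_drop, List.getElem_set]
    rw [if_neg]
    omega

theorem mid_set_set {α : Type} (l : List α) (i j m : Nat) (x y : α) (h : i + 1 + m ≤ j) :
    (((l.set i y).set j x).drop (i+1)).take m = (l.drop (i+1)).take m := by
  apply List.ext_getElem
  · simp
  · intro k h1 h2
    simp only [List.getElem_take, List.getElem_drop, List.getElem_set]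
    rw [if_neg (by simp at h1; omega), if_neg (by simp at h1; omega)]

-- the two-pointer loop rewrites exactly the window [i, j] by revd
theorem pvLoopB_base (a : List Char) (i j : Nat) (hj : j < a.length) (hij : i ≤ j + 1)
    (hge : ¬ i < j) :
    a = a.take i ++ revd ((a.drop i).take (j + 1 - i)) ++ a.drop (j + 1) := by
  rcases Nat.lt_or_ge i (j + 1) with h | h
  · have hi : i = j := by omega
    subst hi
    have h1 : i + 1 - i = 1 := by omega
    rw [h1]
    have hdrop : a.drop i = a[i] :: a.drop (i + 1) := List.drop_eq_getElem_cons hj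
    rw [hdrop]
    simp only [List.take_succ_cons, List.take_zero, revd_single]
    conv_lhs => rw [← List.take_append_drop (i + 1) a]
    rw [List.take_succ, List.getElem?_eq_getElem hj]
    simp
  · have hi : i = j + 1 := by omega
    subst hi
    simp [revd_nil]

theorem getD_eq_get (a : List Char) (i : Nat) (h : i < a.length) :
    a.getD i ' ' = a[i] := by
  simp [List.getD, List.getElem?_eq_getElem h]

theorem pvLoopB_eq : ∀ (n : Nat) (a : List Char) (i j : Nat), j - i ≤ n →
    j < a.length → i ≤ j + 1 →
    pvLoopB a i j = a.take i ++ revd ((a.drop i).take (j + 1 - i)) ++ a.drop (j + 1) := by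
  intro n
  induction n with
  | zero =>
    intro a i j hn hj hij
    have hge : ¬ i < j := by omega
    rw [pvLoopB.eq_def, dif_neg hge]
    exact pvLoopB_base a i j hj hij hge
  | succ n ih =>
    intro a i j hn hj hij
    by_cases hlt : i < j
    · have hi : i < a.length := by omega
      have hgi : a.getD i ' ' = a[i] := getD_eq_get a i hi
      have hgj : a.getD j ' ' = a[j] := getD_eq_get a j hj
      rw [pvLoopB.eq_def, dif_pos hlt, hgi, hgj]
      by_cases hci : '0' ≤ a[i] ∧ a[i] ≤ '9'
      · by_cases hcj : '0' ≤ a[j] ∧ a[j] ≤ '9'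
        · -- both ends digits: swap and recurse
          rw [if_neg (not_not_intro hci), if_neg (not_not_intro hcj)]
          set a' : List Char := (a.set i a[j]).set j a[i] with ha'
          have hlen' : a'.length = a.length := by simp [ha']
          have hb1 : (j - 1) - (i + 1) ≤ n := by omega
          have hb2 : j - 1 < a'.length := by rw [hlen']; omega
          have hb3 : i + 1 ≤ (j - 1) + 1 := by omega
          rw [ih a' (i + 1) (j - 1) hb1 hb2 hb3]
          have e1 : a'.take (i + 1) = a.take i ++ [a[j]] := by
            rw [ha', take_set_of_le _ j (i + 1) _ (by omega),
                List.take_succ, List.getElem?_set_self (by omega),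
                take_set_of_le _ i i _ le_rfl]
            simp
          have e2 : a'.drop ((j - 1) + 1) = a[i] :: a.drop (j + 1) := by
            have hjj : (j - 1) + 1 = j := by omega
            rw [hjj, ha',
                List.drop_eq_getElem_cons
                  (by rw [List.length_set, List.length_set]; omega :
                    j < ((a.set i a[j]).set j a[i]).length)]
            rw [List.getElem_set_self (by simp; omega),
                drop_set_of_lt _ j (j + 1) _ (by omega),
                drop_set_of_lt _ i (j + 1) _ (by omega)]
          have e3 : (a'.drop (i + 1)).take ((j - 1) + 1 - (i + 1))
              = (a.drop (i + 1)).take (j - i - 1) := by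
            have hm : (j - 1) + 1 - (i + 1) = j - i - 1 := by omega
            rw [hm, ha']
            exact mid_set_set a i j (j - i - 1) _ _ (by omega)
          have e4 : (a.drop i).take (j + 1 - i)
              = a[i] :: ((a.drop (i + 1)).take (j - i - 1) ++ [a[j]]) := by
            rw [List.drop_eq_getElem_cons hi]
            have h1 : j + 1 - i = (j - i - 1 + 1) + 1 := by omega
            rw [h1, List.take_succ_cons]
            rw [List.take_succ, List.getElem?_drop,
                show i + 1 + (j - i - 1) = j from by omega,
                List.getElem?_eq_getElem hj]
            rfl
          rw [e1, e2, e3, e4, revd_dig_ends a[i] a[j] _ hci hcj]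
          simp
        · -- right end not a digit: move j left
          rw [if_neg (not_not_intro hci), if_pos hcj]
          have hb1 : (j - 1) - i ≤ n := by omega
          have hb2 : j - 1 < a.length := by omega
          have hb3 : i ≤ (j - 1) + 1 := by omega
          rw [ih a i (j - 1) hb1 hb2 hb3]
          have hjj : (j - 1) + 1 = j := by omega
          rw [hjj]
          have e4 : (a.drop i).take (j + 1 - i)
              = (a.drop i).take (j - i) ++ [a[j]] := by
            have h1 : j + 1 - i = (j - i) + 1 := by omega
            rw [h1, List.take_succ, List.getElem?_drop,
                show i + (j - i) = j from by omega,
                List.getElem?_eq_getElem hj]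
            rfl
          have e5 : a.drop j = a[j] :: a.drop (j + 1) := List.drop_eq_getElem_cons hj
          rw [e4, e5,
              revd_append_nondig ((a.drop i).take (j - i)).length _ a[j] le_rfl hcj]
          simp
      · -- left end not a digit: move i right
        rw [if_pos hci]
        have hb1 : j - (i + 1) ≤ n := by omega
        have hb3 : i + 1 ≤ j + 1 := by omega
        rw [ih a (i + 1) j hb1 hj hb3]
        have e6 : a.take (i + 1) = a.take i ++ [a[i]] := by
          rw [List.take_succ, List.getElem?_eq_getElem hi]; simp
        have e7 : (a.drop i).take (j + 1 - i)
            = a[i] :: (a.drop (i + 1)).take (j + 1 - (i + 1)) := by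
          rw [List.drop_eq_getElem_cons hi]
          have h1 : j + 1 - i = (j + 1 - (i + 1)) + 1 := by omega
          rw [h1, List.take_succ_cons]
        rw [e6, e7, revd_cons_nondig _ _ hci]
        simp only [List.append_assoc, List.cons_append, List.nil_append]
    · rw [pvLoopB.eq_def, dif_neg hlt]
      exact pvLoopB_base a i j hj hij hlt

-- ===== VERDICT (by name: the statement is the Claim_ definition above) =====
theorem reverse_digits_spec : Claim_equal_reverse_digits := by
  intro t _
  show _ = _
  unfold reverse_digits reverse_digits_alt
  congr 1
  rw [pvCollectA_eq_filter, List.nil_append, pvGoA_eq_walk _ _ _ rfl, List.nil_append,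
      pvWalk_eq_revd_aux t.toList.length t.toList le_rfl]
  cases hcs : t.toList with
  | nil => rw [pvLoopB]; simp [revd_nil]
  | cons c rest =>
    rw [pvLoopB_eq (c :: rest).length (c :: rest) 0 ((c :: rest).length - 1)
        (by omega) (by simp) (by omega)]
    simp
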